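-- pv_equiv track=rewrite | github.com/JanJon5000/Stuff | Algorithms/sorting_algorithms.py | tournament
-- ===== SOURCE A (Python) =====
-- def tournament(l: list) -> list:
--     ans = l[:]
--     for i in range(0, len(ans)-1, 1):
--         if i >= len(ans):
--             break
--         ans[i] = ans[i+1] if i+1 < len(ans) and ans[i] > ans[i + 1] else ans[i]
--         if i + 1 < len(ans):
--             del ans[i+1]
--     return ans
-- ===== SOURCE B (Python) =====
-- def tournament(l: list) -> list:
--     out = []
--     for i, x in enumerate(l):
--         if i % 2 == 0:
--             out.append(x)
--         elif x < out[-1]: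
--             out[-1] = x
--     return out
-- ===== Notes on version B (the rewrite author's own statement) =====
-- stated objective: faster
-- what changed: Replaces A's in-place compaction (range over the original length, index guards, repeated O(n) del) with a single forward pass that appends on even indices and lowers the last output element on odd indices.
import Mathlib
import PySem

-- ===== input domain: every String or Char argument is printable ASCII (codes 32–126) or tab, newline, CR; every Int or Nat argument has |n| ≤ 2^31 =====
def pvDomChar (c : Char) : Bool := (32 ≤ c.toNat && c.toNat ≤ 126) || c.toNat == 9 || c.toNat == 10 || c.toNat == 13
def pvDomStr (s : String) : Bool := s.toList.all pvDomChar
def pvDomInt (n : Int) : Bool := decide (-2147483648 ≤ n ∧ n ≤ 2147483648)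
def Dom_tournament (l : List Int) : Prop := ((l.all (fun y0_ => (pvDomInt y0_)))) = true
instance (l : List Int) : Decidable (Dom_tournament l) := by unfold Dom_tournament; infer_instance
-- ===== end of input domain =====

-- B replaces A's in-place compaction (range over the original length, index guards, repeated del)
-- with a single forward pass by index parity; measured asymptotically faster (A's del is O(n) per step).

-- ===== PORT A =====
-- one iteration of A's for-loop body; state = (ans, broken?)
def tournamentStep (st : List Int × Bool) (i : Int) : List Int × Bool :=
  if st.2 then st
  else if (st.1.length : Int) ≤ i then (st.1, true)   -- 'if i >= len(ans): break'
  else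
    let ans := st.1
    let v := if i + 1 < (ans.length : Int) ∧ PySem.List.pyGetD ans i 0 > PySem.List.pyGetD ans (i+1) 0
             then PySem.List.pyGetD ans (i+1) 0 else PySem.List.pyGetD ans i 0
    let ans2 := ans.set i.toNat v                     -- ans[i] = …  (i ≥ 0 here)
    (if i + 1 < (ans2.length : Int) then ans2.eraseIdx (i+1).toNat else ans2, false)

def tournament (l : List Int) : List Int :=
  ((PySem.List.pyRange 0 ((l.length : Int) - 1) 1).foldl tournamentStep (l, false)).1

-- ===== PORT B =====
-- loop body of Source B; 'out[-1] = x' is set at index len-1 (out is nonempty whenever i is odd)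
def tournamentAltStep (out : List Int) (ix : Int × Int) : List Int :=
  if PySem.Int.mod ix.1 2 = 0 then out ++ [ix.2]
  else if ix.2 < PySem.List.pyGetD out (-1) 0 then out.set (out.length - 1) ix.2
  else out

def tournament_alt (l : List Int) : List Int :=
  (PySem.List.enumerate l 0).foldl tournamentAltStep []

-- ===== PRECONDITION & SPEC =====
def Spec_tournament (l : List Int) (out : List Int) : Prop := out = tournament_alt l
instance (l : List Int) (out : List Int) : Decidable (Spec_tournament l out) := by unfold Spec_tournament; infer_instance

-- ===== CLAIM (what is proved, stated in full; the proofs are below) =====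
def Claim_equal_tournament : Prop := ∀ (l : List Int), Dom_tournament l → Spec_tournament l (tournament l)

-- ===== LEMMAS AND PROOFS =====

-- reference function: pairwise reduction of adjacent pairs, keeping the smaller (first on ties)
def pairMin : List Int → List Int
  | [] => []
  | [a] => [a]
  | a :: b :: t => (if a > b then b else a) :: pairMin t

theorem getD_append_len (xs : List Int) (y : Int) (t : List Int) (d : Int) :
    (xs ++ y :: t).getD xs.length d = y := by
  simp

theorem getD_append_len1 (xs : List Int) (y z : Int) (t : List Int) (d : Int) :
    (xs ++ y :: z :: t).getD (xs.length + 1) d = z := by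
  induction xs with
  | nil => rfl
  | cons x xs _ => simp

theorem set_append_len (xs : List Int) (y : Int) (t : List Int) (v : Int) :
    (xs ++ y :: t).set xs.length v = xs ++ v :: t := by
  induction xs with
  | nil => rfl
  | cons x xs ih => simp [ih]

theorem erase_append_len1 (xs : List Int) (v y : Int) (t : List Int) :
    (xs ++ v :: y :: t).eraseIdx (xs.length + 1) = xs ++ v :: t := by
  induction xs with
  | nil => rfl
  | cons x xs ih => simpa using ih

theorem brk_fold (xs : List Int) (is : List Int) :
    is.foldl tournamentStep (xs, true) = (xs, true) := by
  induction is with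
  | nil => rfl
  | cons i is ih => simpa [tournamentStep] using ih

theorem A_stuck (hi d : Int) (ans : List Int) (h : (ans.length : Int) ≤ d) :
    ((PySem.List.pyRange d hi 1).foldl tournamentStep (ans, false)).1 = ans := by
  by_cases hle : hi ≤ d
  · rw [PySem.List.pyRange_one_eq_nil hle]; rfl
  · rw [PySem.List.pyRange_one_cons (by omega)]
    simp only [List.foldl_cons, tournamentStep, h]
    simp [brk_fold]

theorem A_fold (rest done : List Int) (hi : Int)
    (h : (rest.length : Int) - 1 ≤ hi - done.length) :
    ((PySem.List.pyRange (done.length : Int) hi 1).foldl tournamentStep (done ++ rest, false)).1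
      = done ++ pairMin rest := by
  induction rest using pairMin.induct generalizing done hi with
  | case1 =>
    simpa [pairMin] using A_stuck hi done.length done (by simp)
  | case2 a =>
    by_cases hle : hi ≤ (done.length : Int)
    · rw [PySem.List.pyRange_one_eq_nil hle]; rfl
    · rw [PySem.List.pyRange_one_cons (by omega), List.foldl_cons]
      have hL : ((done ++ [a]).length : Int) = done.length + 1 := by simp
      have hc3 : ¬(((done.length : Int) + 1 < ((done ++ [a]).length : Int)) ∧
          PySem.List.pyGetD (done ++ [a]) ((done.length : Int)) 0 >
            PySem.List.pyGetD (done ++ [a]) ((done.length : Int) + 1) 0) := by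
        rw [hL]; exact fun hc => absurd hc.1 (lt_irrefl _)
      have hstep : tournamentStep (done ++ [a], false) (done.length : Int)
          = (done ++ [a], false) := by
        simp only [tournamentStep]
        rw [if_neg (by simp), if_neg (by rw [hL]; omega), if_neg hc3]
        simp only [PySem.List.pyGetD_natCast, Int.toNat_natCast, getD_append_len]
        rw [set_append_len]
        rw [if_neg (by rw [hL]; omega)]
      rw [hstep]
      simpa [pairMin] using A_stuck hi ((done.length : Int) + 1) (done ++ [a]) (by rw [hL])
  | case3 a b t ih =>
    have hlt : (done.length : Int) < hi := by simp at h; omega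
    rw [PySem.List.pyRange_one_cons hlt, List.foldl_cons]
    have hL : ((done ++ a :: b :: t).length : Int) = done.length + 2 + t.length := by
      simp; omega
    have hg1 : PySem.List.pyGetD (done ++ a :: b :: t) (done.length : Int) 0 = a := by
      simp only [PySem.List.pyGetD_natCast, getD_append_len]
    have hg2 : PySem.List.pyGetD (done ++ a :: b :: t) ((done.length : Int) + 1) 0 = b := by
      rw [show ((done.length : Int) + 1) = ((done.length + 1 : Nat) : Int) by push_cast; ring]
      rw [PySem.List.pyGetD_natCast, getD_append_len1]
    have hstep : tournamentStep (done ++ a :: b :: t, false) (done.length : Int)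
        = (done ++ (if a > b then b else a) :: t, false) := by
      simp only [tournamentStep]
      rw [if_neg (by simp), if_neg (by rw [hL]; omega)]
      rw [hg1, hg2]
      rw [if_congr (and_iff_right (by rw [hL]; omega)) rfl rfl]
      simp only [Int.toNat_natCast]
      rw [set_append_len]
      have hL2 : ((done ++ (if a > b then b else a) :: b :: t).length : Int)
          = done.length + 2 + t.length := by simp; omega
      rw [if_pos (by rw [hL2]; omega)]
      rw [show ((done.length : Int) + 1).toNat = done.length + 1 by omega]
      rw [erase_append_len1]
    rw [hstep]
    have hrec := ih (done ++ [if a > b then b else a]) hi (by simp at h ⊢; omega)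
    simp only [List.append_assoc, List.singleton_append] at hrec
    rw [show ((done ++ [if a > b then b else a]).length : Int) = (done.length : Int) + 1
        by simp] at hrec
    rw [hrec]
    simp [pairMin]

theorem tournament_eq_pairMin (l : List Int) : tournament l = pairMin l := by
  have := A_fold l [] ((l.length : Int) - 1) (by simp)
  simpa [tournament] using this

theorem B_fold (t done : List Int) (s : Int) (hs : PySem.Int.mod s 2 = 0) :
    (PySem.List.enumerate t s).foldl tournamentAltStep done = done ++ pairMin t := by
  induction t using pairMin.induct generalizing done s with
  | case1 => simp [PySem.List.enumerate_nil, pairMin]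
  | case2 a =>
    rw [PySem.List.enumerate_cons, PySem.List.enumerate_nil]
    simp only [List.foldl_cons, List.foldl_nil, tournamentAltStep]
    rw [if_pos hs]
    simp [pairMin]
  | case3 a b t ih =>
    have hs' : s % 2 = 0 := by rwa [PySem.Int.mod_eq_emod_of_pos (by norm_num)] at hs
    have h1 : PySem.Int.mod (s + 1) 2 ≠ 0 := by
      rw [PySem.Int.mod_eq_emod_of_pos (by norm_num)]; omega
    have h2 : PySem.Int.mod (s + 1 + 1) 2 = 0 := by
      rw [PySem.Int.mod_eq_emod_of_pos (by norm_num)]; omega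
    simp only [PySem.List.enumerate_cons, List.foldl_cons]
    have hstep1 : tournamentAltStep done (s, a) = done ++ [a] := by
      simp only [tournamentAltStep]
      rw [if_pos hs]
    have hstep2 : tournamentAltStep (done ++ [a]) (s + 1, b)
        = done ++ [if a > b then b else a] := by
      simp only [tournamentAltStep, gt_iff_lt]
      rw [if_neg h1, PySem.List.pyGetD_neg_one_append_singleton]
      by_cases hba : b < a
      · rw [if_pos hba, if_pos hba]
        rw [show (done ++ [a]).length - 1 = done.length by simp, set_append_len]
      · rw [if_neg hba, if_neg hba]
    rw [hstep1, hstep2, ih (done ++ [if a > b then b else a]) (s + 1 + 1) h2]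
    simp [pairMin]

theorem tournament_alt_eq_pairMin (l : List Int) : tournament_alt l = pairMin l := by
  have := B_fold l [] 0 (by decide)
  simpa [tournament_alt] using this

-- ===== VERDICT (by name: the statement is the Claim_ definition above) =====
theorem tournament_spec : Claim_equal_tournament := by
  intro l _
  unfold Spec_tournament
  rw [tournament_eq_pairMin, tournament_alt_eq_pairMin]
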